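-- pv_equiv track=rewrite | github.com/fescofesco/CCC | Challenge 2025/Felix/level5/check_actual_output.py | get_path_from_sequences
-- ===== SOURCE A (Python) =====
-- def get_path_from_sequences(x_sequence, y_sequence):
--     path = []
--     x_pos, y_pos = 0, 0
--     x_idx, y_idx = 0, 0
--     x_elapsed, y_elapsed = 0, 0
--
--     max_time = 1000
--     time = 0
--
--     while time < max_time:
--         path.append((x_pos, y_pos))
--
--         if x_idx >= len(x_sequence) and y_idx >= len(y_sequence):
--             break
--
--         time += 1
--
--         if x_idx < len(x_sequence):
--             x_pace = x_sequence[x_idx]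
--             pace_duration = abs(x_pace) if x_pace != 0 else 1
--
--             if x_elapsed == 0 and x_pace != 0:
--                 x_pos += 1 if x_pace > 0 else -1
--
--             x_elapsed += 1
--             if x_elapsed >= pace_duration:
--                 x_idx += 1
--                 x_elapsed = 0
--
--         if y_idx < len(y_sequence):
--             y_pace = y_sequence[y_idx]
--             pace_duration = abs(y_pace) if y_pace != 0 else 1
--
--             if y_elapsed == 0 and y_pace != 0:
--                 y_pos += 1 if y_pace > 0 else -1
--
--             y_elapsed += 1
--             if y_elapsed >= pace_duration:
--                 y_idx += 1
--                 y_elapsed = 0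
--
--     return path
-- ===== SOURCE B (Python) =====
-- def get_path_from_sequences(x_sequence, y_sequence):
--     CAP = 1001  # only the first 1000 timesteps can ever be reported
--
--     def trajectory(seq):
--         cur = 0
--         out = [0]
--         for pace in seq:
--             if len(out) >= CAP:
--                 break
--             d = abs(pace) if pace != 0 else 1
--             if pace > 0:
--                 cur += 1
--             elif pace < 0:
--                 cur -= 1
--             out.extend([cur] * min(d, CAP - len(out)))
--         return out
--
--     tx = trajectory(x_sequence)
--     ty = trajectory(y_sequence)
--     n = min(max(len(tx), len(ty)), 1000)
--     return [(tx[min(t, len(tx) - 1)], ty[min(t, len(ty) - 1)]) for t in range(n)]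
-- ===== Notes on version B (the rewrite author's own statement) =====
-- stated objective: alternative
-- what changed: Replaces A's single interleaved two-index simulation loop by two independent per-axis trajectory passes (each capped at the 1001 positions that can matter) combined by a zip with last-value padding, truncated to 1000 entries.
import Mathlib
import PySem

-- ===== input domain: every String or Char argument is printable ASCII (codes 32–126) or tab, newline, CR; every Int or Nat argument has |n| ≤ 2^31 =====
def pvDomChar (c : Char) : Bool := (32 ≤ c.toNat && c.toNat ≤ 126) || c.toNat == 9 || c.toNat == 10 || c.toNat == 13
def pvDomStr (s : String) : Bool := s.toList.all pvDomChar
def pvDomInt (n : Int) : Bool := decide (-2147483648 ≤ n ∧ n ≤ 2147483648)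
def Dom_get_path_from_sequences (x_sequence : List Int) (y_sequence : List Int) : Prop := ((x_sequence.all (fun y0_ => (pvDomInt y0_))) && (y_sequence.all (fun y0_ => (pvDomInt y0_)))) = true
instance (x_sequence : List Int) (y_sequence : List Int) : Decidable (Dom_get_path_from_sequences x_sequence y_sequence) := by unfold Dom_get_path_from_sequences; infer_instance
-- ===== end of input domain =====

-- B replaces A's interleaved two-index simulation loop by two independent per-axis
-- trajectory passes (capped at the 1001 positions that can matter) plus a zip/pad
-- combine step; objective: alternative decomposition, same cost.

-- ===== PORT A =====
-- one per-axis update of A's loop body (pos, idx, elapsed), exactly A's branches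
def pvTick (seq : List Int) (pos : Int) (idx : Nat) (el : Int) : Int × Nat × Int :=
  if idx < seq.length then
    let pace := seq.getD idx 0
    let dur : Int := if pace ≠ 0 then |pace| else 1
    let pos' := if el = 0 ∧ pace ≠ 0 then pos + (if 0 < pace then 1 else -1) else pos
    let el' := el + 1
    if dur ≤ el' then (pos', idx + 1, 0) else (pos', idx, el')
  else (pos, idx, el)

-- A's while loop; fuel = max_time - time
def pvLoop (xs ys : List Int) : Nat → (Int × Nat × Int) → (Int × Nat × Int) → List (Int × Int)
  | 0, _, _ => []
  | fuel + 1, sx, sy =>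
    (sx.1, sy.1) ::
      (if xs.length ≤ sx.2.1 ∧ ys.length ≤ sy.2.1 then []
       else pvLoop xs ys fuel (pvTick xs sx.1 sx.2.1 sx.2.2) (pvTick ys sy.1 sy.2.1 sy.2.2))

def get_path_from_sequences (x_sequence : List Int) (y_sequence : List Int) : List (Int × Int) :=
  pvLoop x_sequence y_sequence 1000 (0, 0, 0) (0, 0, 0)

-- ===== PORT B =====
def pvSgn (p : Int) : Int := if 0 < p then 1 else if p < 0 then -1 else 0

-- Source B's trajectory(): positions of one axis over time, capped at 1001 entries
def pvTraj : List Int → Int → List Int → List Int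
  | [], _, out => out
  | p :: rest, cur, out =>
    if 1001 ≤ out.length then out
    else
      let d := if p = 0 then 1 else p.natAbs
      let cur' := cur + pvSgn p
      pvTraj rest cur' (out ++ List.replicate (min d (1001 - out.length)) cur')

def get_path_from_sequences_alt (x_sequence : List Int) (y_sequence : List Int) : List (Int × Int) :=
  let tx := pvTraj x_sequence 0 [0]
  let ty := pvTraj y_sequence 0 [0]
  let n := min (max tx.length ty.length) 1000
  (List.range n).map (fun t => (tx.getD (min t (tx.length - 1)) 0, ty.getD (min t (ty.length - 1)) 0))

-- ===== PRECONDITION & SPEC =====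
def Spec_get_path_from_sequences (x_sequence : List Int) (y_sequence : List Int) (out : List (Int × Int)) : Prop := out = get_path_from_sequences_alt x_sequence y_sequence
instance (x_sequence : List Int) (y_sequence : List Int) (out : List (Int × Int)) : Decidable (Spec_get_path_from_sequences x_sequence y_sequence out) := by unfold Spec_get_path_from_sequences; infer_instance

-- ===== CLAIM (what is proved, stated in full; the proofs are below) =====
def Claim_equal_get_path_from_sequences : Prop := ∀ (x_sequence : List Int) (y_sequence : List Int), Dom_get_path_from_sequences x_sequence y_sequence → Spec_get_path_from_sequences x_sequence y_sequence (get_path_from_sequences x_sequence y_sequence)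

-- ===== LEMMAS AND PROOFS =====

-- uncapped per-axis trajectory (proof-side spec)
def trajU (c : Int) : List Int → List Int
  | [] => [c]
  | p :: rest =>
    c :: (List.replicate ((if p = 0 then 1 else p.natAbs) - 1) (c + pvSgn p) ++ trajU (c + pvSgn p) rest)

-- per-axis machine on the remaining sequence (drop-representation of A's tick)
def bTick : Int × List Int × Int → Int × List Int × Int
  | (pos, [], el) => (pos, [], el)
  | (pos, p :: rest, el) =>
    let dur : Int := if p ≠ 0 then |p| else 1
    let pos' := if el = 0 ∧ p ≠ 0 then pos + (if 0 < p then 1 else -1) else pos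
    if dur ≤ el + 1 then (pos', rest, 0) else (pos', p :: rest, el + 1)

def bIter : Nat → (Int × List Int × Int) → Int × List Int × Int
  | 0, s => s
  | t + 1, s => bIter t (bTick s)

theorem bIter_succ' (t : Nat) (s : Int × List Int × Int) :
    bIter (t + 1) s = bTick (bIter t s) := by
  induction t generalizing s with
  | zero => rfl
  | succ t ih => simpa [bIter] using ih (bTick s)

theorem bIter_add (a b : Nat) (s : Int × List Int × Int) :
    bIter (a + b) s = bIter b (bIter a s) := by
  induction a generalizing s with
  | zero => rw [Nat.zero_add]; rfl
  | succ a ih => rw [Nat.succ_add]; exact ih (bTick s)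

-- duration of one pace segment
def pvD (p : Int) : Nat := if p = 0 then 1 else p.natAbs

theorem pvD_pos (p : Int) : 1 ≤ pvD p := by
  unfold pvD; split <;> omega

theorem trajU_head (c : Int) (s : List Int) : trajU c s = c :: (trajU c s).tail := by
  cases s <;> rfl

theorem trajU_len_pos (c : Int) (s : List Int) : 1 ≤ (trajU c s).length := by
  rw [trajU_head]; simp

theorem trajU_cons (c : Int) (p : Int) (rest : List Int) :
    trajU c (p :: rest) =
      c :: (List.replicate (pvD p - 1) (c + pvSgn p) ++ trajU (c + pvSgn p) rest) := rfl

theorem trajU_cons_len (c : Int) (p : Int) (rest : List Int) :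
    (trajU c (p :: rest)).length = pvD p + (trajU (c + pvSgn p) rest).length := by
  have := pvD_pos p
  simp [trajU_cons]; omega

theorem take_append_take (a b : List Int) (n : Nat) :
    ((a.take n) ++ b).take n = (a ++ b).take n := by
  by_cases h : a.length ≤ n
  · rw [List.take_of_length_le h]
  · have h1 : n ≤ a.length := le_of_not_ge h
    rw [List.take_append_of_le_length (by simpa using h1),
        List.take_append_of_le_length h1, List.take_take, min_self]

theorem traj_take : ∀ (seq : List Int) (c : Int) (out : List Int), out.length ≤ 1001 →
    pvTraj seq c out = (out ++ (trajU c seq).tail).take 1001 := by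
  intro seq
  induction seq with
  | nil => intro c out h; simp [pvTraj, trajU, List.take_of_length_le h]
  | cons p rest ih =>
    intro c out h
    rw [pvTraj]
    by_cases hc : 1001 ≤ out.length
    · simp only [hc, if_true]
      have : out.length = 1001 := le_antisymm h hc
      rw [List.take_append_of_le_length (by omega), List.take_of_length_le (by omega)]
    · simp only [hc, if_false]
      have hlen : out.length + min (pvD p) (1001 - out.length) ≤ 1001 := by omega
      rw [ih _ _ (by simpa using hlen)]
      have e1 : out ++ List.replicate (min (pvD p) (1001 - out.length)) (c + pvSgn p)
          = ((out ++ List.replicate (pvD p) (c + pvSgn p)).take 1001) := by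
        rw [List.take_append, List.take_of_length_le (by omega),
            List.take_replicate]
        rw [Nat.min_comm]
      rw [show (if p = 0 then 1 else p.natAbs) = pvD p from rfl, e1, take_append_take]
      congr 1
      rw [List.append_assoc]
      congr 1
      rw [trajU_cons]
      have hd := pvD_pos p
      simp only [List.tail_cons]
      have e2 : List.replicate (pvD p) (c + pvSgn p)
          = List.replicate (pvD p - 1) (c + pvSgn p) ++ [c + pvSgn p] := by
        rw [← List.replicate_succ']; congr 1; omega
      rw [e2, List.append_assoc, List.singleton_append, ← trajU_head]

theorem pvSgn_ne (p : Int) (hp : p ≠ 0) : (if 0 < p then (1 : Int) else -1) = pvSgn p := by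
  unfold pvSgn
  rcases lt_trichotomy p 0 with h | h | h <;> simp_all

theorem bTick_cons (pos : Int) (p : Int) (rest : List Int) (el : Int) :
    bTick (pos, p :: rest, el) =
      (let dur : Int := if p ≠ 0 then |p| else 1;
       let pos' := if el = 0 ∧ p ≠ 0 then pos + (if 0 < p then 1 else -1) else pos;
       if dur ≤ el + 1 then (pos', rest, 0) else (pos', p :: rest, el + 1)) := rfl

theorem bIter_nil (t : Nat) (c el : Int) : bIter t (c, ([] : List Int), el) = (c, [], el) := by
  induction t with
  | zero => rfl
  | succ t ih => rw [bIter_succ', ih]; rfl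

-- segment lemmas for the per-axis machine
theorem seg_lt : ∀ (t : Nat) (p : Int) (rest : List Int) (c : Int), 0 < t → t < pvD p →
    bIter t (c, p :: rest, 0) = (c + pvSgn p, p :: rest, (t : Int)) := by
  intro t
  induction t with
  | zero => intro p rest c h; omega
  | succ t ih =>
    intro p rest c _ hlt
    have hp : p ≠ 0 := by
      intro h; rw [h] at hlt; simp [pvD] at hlt
    have habs : t + 2 ≤ p.natAbs := by
      unfold pvD at hlt; simp [hp] at hlt; omega
    have habs' : ¬ (|p| ≤ (t : Int) + 1) := by
      rw [Int.abs_eq_natAbs]; omega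
    cases t with
    | zero =>
      show bIter 0 (bTick (c, p :: rest, 0)) = _
      rw [bTick_cons]
      simp only [hp, ne_eq, not_false_eq_true, if_true, and_true]
      rw [if_neg (by simpa using habs'), pvSgn_ne p hp]
      rfl
    | succ t' =>
      rw [bIter_succ', ih p rest c (by omega) (by omega), bTick_cons]
      have : ¬ ((t' : Int) + 1 = 0 ∧ p ≠ 0) := by
        intro h; omega
      simp only [hp, ne_eq, not_false_eq_true, if_true]
      rw [if_neg (by push_cast at habs' ⊢; omega)]
      push_cast
      rfl

theorem seg_eq (p : Int) (rest : List Int) (c : Int) :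
    bIter (pvD p) (c, p :: rest, 0) = (c + pvSgn p, rest, 0) := by
  rcases Nat.lt_or_ge 1 (pvD p) with h | h
  · -- last tick from state (c + sgn, p::rest, pvD p - 1)
    have hp : p ≠ 0 := by
      intro h0; rw [h0] at h; simp [pvD] at h
    have habs : pvD p = p.natAbs := by simp [pvD, hp]
    have : pvD p = (pvD p - 1) + 1 := by omega
    rw [this, bIter_succ', seg_lt (pvD p - 1) p rest c (by omega) (by omega), bTick_cons]
    simp only [hp, ne_eq, not_false_eq_true, if_true, and_true]
    rw [if_pos (by rw [Int.abs_eq_natAbs, habs]; omega),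
        if_neg (show ¬((pvD p - 1 : Nat) : Int) = 0 by omega)]
  · -- pvD p = 1 : single tick finishes the segment
    have h1 : pvD p = 1 := le_antisymm h (pvD_pos p)
    rw [h1]
    show bIter 0 (bTick (c, p :: rest, 0)) = _
    rw [bTick_cons]
    by_cases hp : p = 0
    · simp only [hp]
      norm_num [pvSgn]
      rfl
    · have habs : |p| = 1 := by
        have : p.natAbs = 1 := by simpa [pvD, hp] using h1
        rw [Int.abs_eq_natAbs, this]; rfl
      simp only [hp, ne_eq, not_false_eq_true, if_true, and_true]
      rw [if_pos (by rw [habs]; omega), pvSgn_ne p hp]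
      rfl

theorem axis_main : ∀ (seq : List Int) (c : Int) (t : Nat),
    (bIter t (c, seq, 0)).1 = (trajU c seq).getD (min t ((trajU c seq).length - 1)) 0 ∧
    ((bIter t (c, seq, 0)).2.1 = [] ↔ (trajU c seq).length - 1 ≤ t) := by
  intro seq
  induction seq with
  | nil =>
    intro c t
    rw [bIter_nil]
    simp [trajU]
  | cons p rest ih =>
    intro c t
    have hD := pvD_pos p
    have hL' := trajU_len_pos (c + pvSgn p) rest
    have hlen := trajU_cons_len c p rest
    rcases Nat.lt_or_ge t (pvD p) with hlt | hge
    · rcases Nat.eq_zero_or_pos t with h0 | hpos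
      · subst h0
        constructor
        · simp [bIter, trajU_cons]
        · constructor
          · intro hh; simp [bIter] at hh
          · intro hh; exact absurd hh (by omega)
      · rw [seg_lt t p rest c hpos hlt]
        have hmin : min t ((trajU c (p :: rest)).length - 1) = t := by omega
        constructor
        · rw [hmin, trajU_cons]
          have ht1 : t = (t - 1) + 1 := by omega
          rw [ht1, List.getD_cons_succ, List.getD_append _ _ _ _ (by simp; omega),
              List.getD_replicate _ (by omega)]
        · simp only []
          constructor
          · intro hh; simp at hh
          · intro hh; exact absurd hh (by omega)
    · obtain ⟨t', rfl⟩ : ∃ t', t = pvD p + t' := ⟨t - pvD p, by omega⟩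
      rw [bIter_add, seg_eq]
      obtain ⟨ihp, ihe⟩ := ih (c + pvSgn p) t'
      constructor
      · rw [ihp]
        have hm : min (pvD p + t') ((trajU c (p :: rest)).length - 1)
            = pvD p + min t' ((trajU (c + pvSgn p) rest).length - 1) := by omega
        rw [hm, trajU_cons]
        have : pvD p + min t' ((trajU (c + pvSgn p) rest).length - 1)
            = ((pvD p - 1 + min t' ((trajU (c + pvSgn p) rest).length - 1))) + 1 := by omega
        rw [this, List.getD_cons_succ,
            List.getD_append_right _ _ _ _ (by simp)]
        congr 1
        simp
      · rw [ihe]; omega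

-- bridge: A's indexed tick is B's machine on the dropped suffix
theorem tick_rel (seq : List Int) (pos : Int) (idx : Nat) (el : Int) (h : idx ≤ seq.length) :
    (pvTick seq pos idx el).1 = (bTick (pos, seq.drop idx, el)).1 ∧
    seq.drop (pvTick seq pos idx el).2.1 = (bTick (pos, seq.drop idx, el)).2.1 ∧
    (pvTick seq pos idx el).2.2 = (bTick (pos, seq.drop idx, el)).2.2 ∧
    (pvTick seq pos idx el).2.1 ≤ seq.length := by
  by_cases hidx : idx < seq.length
  · have hdrop : seq.drop idx = seq[idx] :: seq.drop (idx + 1) :=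
      List.drop_eq_getElem_cons hidx
    have hgetD : seq.getD idx 0 = seq[idx] := List.getD_eq_getElem seq 0 hidx
    rw [hdrop, bTick_cons]
    simp only [pvTick, hidx, if_true, hgetD]
    split_ifs <;> exact ⟨rfl, by first | rfl | exact hdrop, rfl, by first | exact hidx | exact hidx.le⟩
  · have heq : idx = seq.length := by omega
    rw [heq, List.drop_length]
    unfold pvTick bTick
    rw [if_neg (by omega)]
    simp

theorem loop_eq (xs ys : List Int) : ∀ (k t0 : Nat) (sx sy : Int × Nat × Int),
    t0 + k = 1000 →
    (sx.1 = (bIter t0 (0, xs, 0)).1 ∧ sx.2.1 ≤ xs.length ∧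
      xs.drop sx.2.1 = (bIter t0 (0, xs, 0)).2.1 ∧ sx.2.2 = (bIter t0 (0, xs, 0)).2.2) →
    (sy.1 = (bIter t0 (0, ys, 0)).1 ∧ sy.2.1 ≤ ys.length ∧
      ys.drop sy.2.1 = (bIter t0 (0, ys, 0)).2.1 ∧ sy.2.2 = (bIter t0 (0, ys, 0)).2.2) →
    t0 < min (max (trajU 0 xs).length (trajU 0 ys).length) 1000 →
    pvLoop xs ys k sx sy =
      (List.range' t0 (min (max (trajU 0 xs).length (trajU 0 ys).length) 1000 - t0)).map
        (fun t => ((trajU 0 xs).getD (min t ((trajU 0 xs).length - 1)) 0,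
                   (trajU 0 ys).getD (min t ((trajU 0 ys).length - 1)) 0)) := by
  intro k
  induction k with
  | zero => intro t0 sx sy hk hx hy hlt; omega
  | succ k ih =>
    intro t0 sx sy hk hx hy hlt
    obtain ⟨hx1, hx2, hx3, hx4⟩ := hx
    obtain ⟨hy1, hy2, hy3, hy4⟩ := hy
    have ax := axis_main xs 0 t0
    have ay := axis_main ys 0 t0
    have hLx := trajU_len_pos 0 xs
    have hLy := trajU_len_pos 0 ys
    have hbx : (xs.length ≤ sx.2.1) ↔ ((trajU 0 xs).length - 1 ≤ t0) := by
      rw [← ax.2, ← hx3, List.drop_eq_nil_iff]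
    have hby : (ys.length ≤ sy.2.1) ↔ ((trajU 0 ys).length - 1 ≤ t0) := by
      rw [← ay.2, ← hy3, List.drop_eq_nil_iff]
    have hhead : (sx.1, sy.1)
        = ((trajU 0 xs).getD (min t0 ((trajU 0 xs).length - 1)) 0,
           (trajU 0 ys).getD (min t0 ((trajU 0 ys).length - 1)) 0) := by
      rw [hx1, hy1, ax.1, ay.1]
    rw [pvLoop]
    by_cases hb : xs.length ≤ sx.2.1 ∧ ys.length ≤ sy.2.1
    · rw [if_pos hb]
      have e1 := hbx.mp hb.1
      have e2 := hby.mp hb.2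
      rw [show min (max (trajU 0 xs).length (trajU 0 ys).length) 1000 - t0 = 1 by omega,
          List.range'_one]
      simpa using hhead
    · rw [if_neg hb]
      have hsplit : t0 + 1 < (trajU 0 xs).length ∨ t0 + 1 < (trajU 0 ys).length := by
        by_contra hcc
        push Not at hcc
        exact hb ⟨hbx.mpr (by omega), hby.mpr (by omega)⟩
      rw [show min (max (trajU 0 xs).length (trajU 0 ys).length) 1000 - t0
            = (min (max (trajU 0 xs).length (trajU 0 ys).length) 1000 - (t0 + 1)) + 1 by omega,
          List.range'_succ, List.map_cons]
      congr 1
      by_cases h2 : t0 + 1 < min (max (trajU 0 xs).length (trajU 0 ys).length) 1000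
      · have trx := tick_rel xs sx.1 sx.2.1 sx.2.2 hx2
        have try' := tick_rel ys sy.1 sy.2.1 sy.2.2 hy2
        have ex : (sx.1, xs.drop sx.2.1, sx.2.2) = bIter t0 (0, xs, 0) := by
          rw [hx3, hx1, hx4]
        have ey : (sy.1, ys.drop sy.2.1, sy.2.2) = bIter t0 (0, ys, 0) := by
          rw [hy3, hy1, hy4]
        rw [ex, ← bIter_succ'] at trx
        rw [ey, ← bIter_succ'] at try'
        exact ih (t0 + 1) _ _ (by omega)
          ⟨trx.1, trx.2.2.2, trx.2.1, trx.2.2.1⟩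
          ⟨try'.1, try'.2.2.2, try'.2.1, try'.2.2.1⟩ h2
      · have hk0 : k = 0 := by omega
        subst hk0
        rw [show min (max (trajU 0 xs).length (trajU 0 ys).length) 1000 - (t0 + 1) = 0 by omega]
        simp [pvLoop]

theorem cap_take (seq : List Int) : pvTraj seq 0 [0] = (trajU 0 seq).take 1001 := by
  rw [traj_take seq 0 [0] (by simp)]
  conv_rhs => rw [trajU_head 0 seq]
  rfl

theorem cap_len (seq : List Int) :
    (pvTraj seq 0 [0]).length = min (trajU 0 seq).length 1001 := by
  rw [cap_take]; simp [min_comm]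

theorem cap_getD (seq : List Int) (t : Nat) (h : t ≤ 1000) :
    (pvTraj seq 0 [0]).getD (min t ((pvTraj seq 0 [0]).length - 1)) 0 =
    (trajU 0 seq).getD (min t ((trajU 0 seq).length - 1)) 0 := by
  rw [cap_take]
  by_cases hlen : (trajU 0 seq).length ≤ 1001
  · rw [List.take_of_length_le hlen]
  · have h1 : ((trajU 0 seq).take 1001).length = 1001 := by simp; omega
    rw [h1, show min t (1001 - 1) = t by omega, show min t ((trajU 0 seq).length - 1) = t by omega]
    unfold List.getD
    rw [List.getElem?_take_of_lt (by omega)]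

-- ===== VERDICT (by name: the statement is the Claim_ definition above) =====
theorem alt_eval (xs ys : List Int) : get_path_from_sequences_alt xs ys
    = (List.range (min (max (pvTraj xs 0 [0]).length (pvTraj ys 0 [0]).length) 1000)).map
        (fun t => ((pvTraj xs 0 [0]).getD (min t ((pvTraj xs 0 [0]).length - 1)) 0,
                   (pvTraj ys 0 [0]).getD (min t ((pvTraj ys 0 [0]).length - 1)) 0)) := rfl

theorem get_path_from_sequences_spec : Claim_equal_get_path_from_sequences := by
  unfold Claim_equal_get_path_from_sequences
  intro xs ys _
  unfold Spec_get_path_from_sequences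
  have hLx := trajU_len_pos 0 xs
  have hLy := trajU_len_pos 0 ys
  have h := loop_eq xs ys 1000 0 (0, 0, 0) (0, 0, 0) rfl
    ⟨rfl, Nat.zero_le _, rfl, rfl⟩ ⟨rfl, Nat.zero_le _, rfl, rfl⟩ (by omega)
  show pvLoop xs ys 1000 (0, 0, 0) (0, 0, 0) = _
  rw [h, alt_eval]
  have hn : min (max (pvTraj xs 0 [0]).length (pvTraj ys 0 [0]).length) 1000
      = min (max (trajU 0 xs).length (trajU 0 ys).length) 1000 := by
    rw [cap_len, cap_len]; omega
  rw [hn, Nat.sub_zero, ← List.range_eq_range']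
  apply List.map_congr_left
  intro t ht
  rw [List.mem_range] at ht
  rw [cap_getD xs t (by omega), cap_getD ys t (by omega)]
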